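-- pv_equiv track=rewrite | github.com/MoodMonitor/OkeyCard-BOT | BOT.py | IloscPsucia
-- ===== SOURCE A (Python) =====
-- def IloscPsucia(lista, el):
--     lis = list(lista)
--     literkilka = []
--     for i in lista:
--         if i[1] == el[1]:
--             literkilka.append(i)
--     wynik = []
--     licznik = 0
--     for i in literkilka:
--         if i == el:
--             wynik.append(licznik)
--             licznik = 0
--         else:
--             licznik+=1
--     wynik.append(licznik)
--     return min(wynik)
-- ===== SOURCE B (Python) =====
-- def IloscPsucia(lista, el):
--     flt = [i for i in lista if i[1] == el[1]]
--     idx = [k for k, x in enumerate(flt) if x == el]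
--     return min(b - a - 1 for a, b in zip([-1] + idx, idx + [len(flt)]))
-- ===== Notes on version B (the rewrite author's own statement) =====
-- stated objective: alternative
-- what changed: Replaces A's stateful running-counter segment scan with an occurrence-index table: collect the indices of el in the filtered list, add -1 and len sentinels, and take the minimum of consecutive index differences minus one.
import Mathlib
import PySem

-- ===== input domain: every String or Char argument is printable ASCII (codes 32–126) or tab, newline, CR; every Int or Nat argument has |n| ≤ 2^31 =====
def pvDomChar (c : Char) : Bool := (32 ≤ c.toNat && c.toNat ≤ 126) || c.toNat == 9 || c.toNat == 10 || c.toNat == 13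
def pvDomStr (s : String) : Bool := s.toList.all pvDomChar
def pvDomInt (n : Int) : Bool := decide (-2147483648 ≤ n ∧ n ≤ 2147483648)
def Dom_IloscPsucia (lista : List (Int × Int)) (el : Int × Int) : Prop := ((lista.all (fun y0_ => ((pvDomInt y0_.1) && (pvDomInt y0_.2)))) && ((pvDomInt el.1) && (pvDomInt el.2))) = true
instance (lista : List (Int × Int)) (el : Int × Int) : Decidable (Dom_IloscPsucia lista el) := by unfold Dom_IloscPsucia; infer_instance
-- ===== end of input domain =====

-- B replaces A's running-counter segment scan with an index-table-and-differences computation; same O(n) cost.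

-- ===== PORT A =====
-- literal port: build literkilka by the append loop, run the counter loop over (wynik, licznik), then min(wynik ++ [licznik])
def IloscPsucia (lista : List (Int × Int)) (el : Int × Int) : Int :=
  let literkilka := lista.foldl (fun acc i => if i.2 == el.2 then acc ++ [i] else acc) []
  let p := literkilka.foldl
    (fun (s : List Int × Int) i => if i == el then (s.1 ++ [s.2], 0) else (s.1, s.2 + 1)) ([], 0)
  let wynik := p.1 ++ [p.2]
  (PySem.List.min? wynik (fun x => x)).getD 0  -- wynik is never empty, so Python's min never raises

-- ===== PORT B =====
-- literal port of Source B: filter, occurrence indices via enumerate, sentinel differences, min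
def IloscPsucia_alt (lista : List (Int × Int)) (el : Int × Int) : Int :=
  let flt := lista.filter (fun i => i.2 == el.2)
  let idx : List Int := ((PySem.List.enumerate flt 0).filter (fun p => p.2 == el)).map (fun p => p.1)
  let gaps := (((-1 : Int) :: idx).zip (idx ++ [(flt.length : Int)])).map (fun p => p.2 - p.1 - 1)
  (PySem.List.min? gaps (fun x => x)).getD 0  -- gaps is never empty, so Python's min never raises

-- ===== PRECONDITION & SPEC =====
def Spec_IloscPsucia (lista : List (Int × Int)) (el : Int × Int) (out : Int) : Prop := out = IloscPsucia_alt lista el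
instance (lista : List (Int × Int)) (el : Int × Int) (out : Int) : Decidable (Spec_IloscPsucia lista el out) := by unfold Spec_IloscPsucia; infer_instance

-- ===== CLAIM (what is proved, stated in full; the proofs are below) =====
def Claim_equal_IloscPsucia : Prop := ∀ (lista : List (Int × Int)) (el : Int × Int), Dom_IloscPsucia lista el → Spec_IloscPsucia lista el (IloscPsucia lista el)

-- ===== LEMMAS AND PROOFS =====

def pvIdx (el : Int × Int) (t : List (Int × Int)) : List Int :=
  ((PySem.List.enumerate t 0).filter (fun p => p.2 == el)).map (fun p => p.1)

lemma pvIdx_shift (el : Int × Int) (t : List (Int × Int)) :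
    ∀ s : Int, ((PySem.List.enumerate t s).filter (fun p => p.2 == el)).map (fun p => p.1)
      = (pvIdx el t).map (· + s) := by
  induction t with
  | nil => intro s; simp [pvIdx, PySem.List.enumerate_nil]
  | cons x t ih =>
    intro s
    simp only [pvIdx, PySem.List.enumerate_cons, List.filter_cons]
    by_cases hx : x == el
    · simp only [hx, if_pos, List.map_cons, ih (s+1), ih 1, zero_add, List.map_map]
      refine congrArg₂ _ (by ring) (List.map_congr_left ?_)
      intro a _; simp [Function.comp]; ring
    · simp only [hx, Bool.false_eq_true, if_false, ih (s+1), ih 1, zero_add, List.map_map]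
      refine List.map_congr_left ?_
      intro a _; simp [Function.comp]; ring

def pvGaps (el : Int × Int) (t : List (Int × Int)) : List Int :=
  (((-1 : Int) :: pvIdx el t).zip (pvIdx el t ++ [(t.length : Int)])).map (fun p => p.2 - p.1 - 1)

def pvSegs (el : Int × Int) : List (Int × Int) → List Int
  | [] => [0]
  | i :: t => if i == el then 0 :: pvSegs el t
              else match pvSegs el t with
                   | [] => [1]
                   | g :: gs => (g + 1) :: gs

lemma pvSegs_ne_nil (el : Int × Int) (t : List (Int × Int)) : pvSegs el t ≠ [] := by
  cases t with
  | nil => simp [pvSegs]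
  | cons i t =>
    simp only [pvSegs]
    split
    · simp
    · split <;> simp

lemma pvIdx_cons (el i : Int × Int) (t : List (Int × Int)) :
    pvIdx el (i :: t)
      = if i == el then 0 :: (pvIdx el t).map (· + 1) else (pvIdx el t).map (· + 1) := by
  simp only [pvIdx, PySem.List.enumerate_cons, List.filter_cons, zero_add]
  by_cases hi : i == el
  · simp only [hi, if_pos, List.map_cons]
    rw [pvIdx_shift el t 1]; rfl
  · simp only [hi, Bool.false_eq_true, if_false]
    rw [pvIdx_shift el t 1]; rfl

lemma pvZipDiff_shift (a b : List Int) :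
    ((a.map (· + 1)).zip (b.map (· + 1))).map (fun p => p.2 - p.1 - 1)
      = (a.zip b).map (fun p => p.2 - p.1 - 1) := by
  induction a generalizing b with
  | nil => simp
  | cons x a ih =>
    cases b with
    | nil => simp
    | cons y b => simp only [List.map_cons, List.zip_cons_cons, ih]; ring_nf

lemma pvGaps_eq_segs (el : Int × Int) (t : List (Int × Int)) : pvGaps el t = pvSegs el t := by
  induction t with
  | nil => simp [pvGaps, pvIdx, pvSegs, PySem.List.enumerate_nil]
  | cons i t ih =>
    have hlen : ((i :: t).length : Int) = (t.length : Int) + 1 := by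
      simp
    by_cases hi : i == el
    · simp only [pvGaps, pvIdx_cons, hi, if_pos, pvSegs, ← ih, pvGaps, hlen]
      have hcons : ((0 : Int) :: (pvIdx el t).map (· + 1))
          = ((-1 : Int) :: pvIdx el t).map (· + 1) := by simp
      have happ : (pvIdx el t).map (· + 1) ++ [(t.length : Int) + 1]
          = (pvIdx el t ++ [(t.length : Int)]).map (· + 1) := by simp
      simp only [List.cons_append, List.zip_cons_cons, List.map_cons]
      rw [hcons, happ, pvZipDiff_shift]
      norm_num
    · simp only [pvGaps, pvIdx_cons, hi, Bool.false_eq_true, if_false, pvSegs, ← ih, pvGaps, hlen]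
      cases hJ : pvIdx el t with
      | nil => simp
      | cons j js =>
        simp only [List.map_cons, List.cons_append, List.zip_cons_cons, List.map_cons]
        have happ : js.map (· + 1) ++ [(t.length : Int) + 1]
            = (js ++ [(t.length : Int)]).map (· + 1) := by simp
        rw [happ]
        rw [show ((j + 1) :: js.map (· + 1)) = ((j :: js).map (· + 1)) from rfl]
        rw [pvZipDiff_shift]
        exact congrArg₂ _ (by ring) rfl

def pvAddHead (c : Int) : List Int → List Int
  | [] => [c]
  | g :: gs => (g + c) :: gs

lemma pvLoopA_spec (el : Int × Int) (t : List (Int × Int)) :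
    ∀ (w : List Int) (c : Int),
      (let p := t.foldl
        (fun (s : List Int × Int) i => if i == el then (s.1 ++ [s.2], 0) else (s.1, s.2 + 1)) (w, c)
       p.1 ++ [p.2]) = w ++ pvAddHead c (pvSegs el t) := by
  induction t with
  | nil => intro w c; simp [pvSegs, pvAddHead]
  | cons i t ih =>
    intro w c
    simp only [List.foldl_cons]
    by_cases hi : i == el
    · simp only [hi, if_pos, ih]
      obtain ⟨g, gs, hgs⟩ : ∃ g gs, pvSegs el t = g :: gs := by
        cases h : pvSegs el t with
        | nil => exact absurd h (pvSegs_ne_nil el t)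
        | cons g gs => exact ⟨g, gs, rfl⟩
      simp [pvSegs, hi, hgs, pvAddHead]
    · simp only [hi, Bool.false_eq_true, if_false, ih]
      cases hgs : pvSegs el t with
      | nil => exact absurd hgs (pvSegs_ne_nil el t)
      | cons g gs =>
        simp only [pvSegs, hi, Bool.false_eq_true, if_false, hgs, pvAddHead]
        refine congrArg (w ++ ·) (congrArg₂ _ (by ring) rfl)

-- ===== VERDICT (by name: the statement is the Claim_ definition above) =====
theorem IloscPsucia_spec : Claim_equal_IloscPsucia := by
  intro lista el _
  unfold Spec_IloscPsucia IloscPsucia IloscPsucia_alt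
  rw [PySem.List.foldl_append_if_eq_filter]
  simp only [List.nil_append]
  set flt := lista.filter (fun i => i.2 == el.2) with hflt
  have hA := pvLoopA_spec el flt [] 0
  simp only [List.nil_append] at hA
  have hB : (((-1 : Int) :: ((PySem.List.enumerate flt 0).filter (fun p => p.2 == el)).map
        (fun p => p.1)).zip
        (((PySem.List.enumerate flt 0).filter (fun p => p.2 == el)).map (fun p => p.1)
          ++ [(flt.length : Int)])).map (fun p => p.2 - p.1 - 1) = pvSegs el flt := by
    simpa [pvGaps, pvIdx] using pvGaps_eq_segs el flt
  simp only [hA, hB]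
  congr 1
  cases h : pvSegs el flt with
  | nil => exact absurd h (pvSegs_ne_nil el flt)
  | cons g gs => simp [pvAddHead]
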